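-- pv_equiv track=rewrite | github.com/abelvanbergen/AdventofCode | 2019/day10/ex01.py | commen_divider
-- ===== SOURCE A (Python) =====
-- def commen_divider(dx, dy) -> int:
-- 	if 0 in [dx, dy]:
-- 		divider = abs(dx) if dx != 0 else abs(dy)
-- 		return dx//divider, dy//divider
-- 	step = abs(dx) if abs(dx) < abs(dy) else abs(dy)
-- 	for s in range(step, 0, -1):
-- 		if dx % s == 0 and dy % s == 0:
-- 			return dx//s, dy//s
-- ===== SOURCE B (Python) =====
-- def commen_divider(dx, dy):
--     # Euclidean algorithm instead of descending trial division.
--     a, b = abs(dx), abs(dy)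
--     while b:
--         a, b = b, a % b
--     return dx // a, dy // a
-- ===== Notes on version B (the rewrite author's own statement) =====
-- stated objective: faster
-- what changed: Replaces A's descending scan from min(|dx|,|dy|) testing every candidate divisor with a modulo-based Euclidean gcd loop, then divides once by the gcd (the zero special-case disappears).
import Mathlib
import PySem

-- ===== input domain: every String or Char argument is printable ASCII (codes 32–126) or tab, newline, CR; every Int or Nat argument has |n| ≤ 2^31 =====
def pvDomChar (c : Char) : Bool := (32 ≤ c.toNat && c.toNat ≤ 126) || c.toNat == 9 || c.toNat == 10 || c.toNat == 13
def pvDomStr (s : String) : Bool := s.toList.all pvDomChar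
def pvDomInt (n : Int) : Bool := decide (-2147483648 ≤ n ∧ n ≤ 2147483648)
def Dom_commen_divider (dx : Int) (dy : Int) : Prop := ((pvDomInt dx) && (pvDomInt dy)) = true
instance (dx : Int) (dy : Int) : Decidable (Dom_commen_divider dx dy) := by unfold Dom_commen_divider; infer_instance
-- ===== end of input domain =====

-- B replaces A's descending trial-division scan by a Euclidean gcd loop, then divides once; asymptotically faster.

-- ===== PORT A =====
-- the 'for s in range(step, 0, -1)' loop: first s dividing both gives the answer; [] is the
-- (unreachable on Pre_) fall-off-the-end 'return None'
def commen_divider_loop (dx : Int) (dy : Int) : List Int → List Int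
  | [] => []
  | s :: rest =>
    if PySem.Int.mod dx s = 0 ∧ PySem.Int.mod dy s = 0 then
      [PySem.Int.floordiv dx s, PySem.Int.floordiv dy s]
    else commen_divider_loop dx dy rest

def commen_divider (dx : Int) (dy : Int) : List Int :=
  if dx = 0 ∨ dy = 0 then
    let divider : Int := if dx ≠ 0 then |dx| else |dy|
    [PySem.Int.floordiv dx divider, PySem.Int.floordiv dy divider]
  else
    let step : Int := if |dx| < |dy| then |dx| else |dy|
    commen_divider_loop dx dy (PySem.List.pyRange step 0 (-1))

-- ===== PORT B =====
-- 'a, b = abs(dx), abs(dy); while b: a, b = b, a % b'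
def euclidLoop (a : Nat) (b : Nat) : Nat :=
  if h : b = 0 then a else euclidLoop b (a % b)
termination_by b
decreasing_by exact Nat.mod_lt _ (Nat.pos_of_ne_zero h)

def commen_divider_alt (dx : Int) (dy : Int) : List Int :=
  let g : Int := (euclidLoop dx.natAbs dy.natAbs : Nat)
  [PySem.Int.floordiv dx g, PySem.Int.floordiv dy g]

-- ===== PRECONDITION & SPEC =====
-- Pre_ excludes only (0,0), where the Python A raises ZeroDivisionError (divider is 0).
def Pre_commen_divider (dx : Int) (dy : Int) : Prop := ¬ (dx = 0 ∧ dy = 0)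
instance (dx : Int) (dy : Int) : Decidable (Pre_commen_divider dx dy) := by unfold Pre_commen_divider; infer_instance
def pvWitness_commen_divider : Int × Int := (6, -4)

def Spec_commen_divider (dx : Int) (dy : Int) (out : List Int) : Prop := out = commen_divider_alt dx dy
instance (dx : Int) (dy : Int) (out : List Int) : Decidable (Spec_commen_divider dx dy out) := by unfold Spec_commen_divider; infer_instance

-- ===== CLAIM (what is proved, stated in full; the proofs are below) =====
def Claim_equal_commen_divider : Prop := ∀ (dx : Int) (dy : Int), Dom_commen_divider dx dy → Pre_commen_divider dx dy → Spec_commen_divider dx dy (commen_divider dx dy)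

-- ===== LEMMAS AND PROOFS =====

theorem euclidLoop_eq_gcd (a b : Nat) : euclidLoop a b = Nat.gcd a b := by
  induction b using Nat.strong_induction_on generalizing a with
  | _ b ih =>
    unfold euclidLoop
    by_cases h : b = 0
    · simp [h]
    · rw [dif_neg h, ih (a % b) (Nat.mod_lt _ (Nat.pos_of_ne_zero h)) b]
      rw [Nat.gcd_comm a b, Nat.gcd_rec b a]
      exact (Nat.gcd_comm _ _)

theorem loop_finds_gcd (dx dy : Int) (hdx : dx ≠ 0) (hdy : dy ≠ 0) :
    ∀ n : Nat, (Int.gcd dx dy : Int) ≤ (n : Int) →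
      commen_divider_loop dx dy (PySem.List.pyRange (n : Int) 0 (-1)) =
        [PySem.Int.floordiv dx (Int.gcd dx dy), PySem.Int.floordiv dy (Int.gcd dx dy)] := by
  have hg1 : 1 ≤ (Int.gcd dx dy : Int) := by
    have := Int.gcd_pos_of_ne_zero_left dy hdx
    exact_mod_cast this
  intro n
  induction n with
  | zero => intro h; omega
  | succ m ih =>
    intro h
    have hpos : (0 : Int) < ((m + 1 : Nat) : Int) := by positivity
    rw [PySem.List.pyRange_neg_one_cons hpos]
    by_cases he : ((m + 1 : Nat) : Int) = (Int.gcd dx dy : Int)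
    · rw [commen_divider_loop, if_pos]
      · rw [he]
      · constructor
        · rw [PySem.Int.mod_eq_zero_iff_dvd]; rw [he]; exact Int.gcd_dvd_left dx dy
        · rw [PySem.Int.mod_eq_zero_iff_dvd]; rw [he]; exact Int.gcd_dvd_right dx dy
    · rw [commen_divider_loop, if_neg]
      · have : ((m + 1 : Nat) : Int) - 1 = (m : Int) := by push_cast; ring
        rw [this]
        exact ih (by omega)
      · rintro ⟨h1, h2⟩
        rw [PySem.Int.mod_eq_zero_iff_dvd] at h1 h2
        have hd : ((m + 1 : Nat) : Int) ∣ (Int.gcd dx dy : Int) := by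
          exact_mod_cast Int.dvd_gcd h1 h2
        have := Int.le_of_dvd (by omega) hd
        omega

theorem commen_divider_eq (dx dy : Int) (hpre : ¬ (dx = 0 ∧ dy = 0)) :
    commen_divider dx dy = commen_divider_alt dx dy := by
  have halt : commen_divider_alt dx dy =
      [PySem.Int.floordiv dx (Int.gcd dx dy), PySem.Int.floordiv dy (Int.gcd dx dy)] := by
    unfold commen_divider_alt
    rw [euclidLoop_eq_gcd]
    rfl
  rw [halt]
  unfold commen_divider
  by_cases hz : dx = 0 ∨ dy = 0
  · rw [if_pos hz]
    rcases hz with h | h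
    · have hdy : dy ≠ 0 := fun hy => hpre ⟨h, hy⟩
      have : Int.gcd dx dy = dy.natAbs := by rw [h]; simp [Int.gcd]
      rw [this]; simp only [h, Int.abs_eq_natAbs]
      simp
    · by_cases hdx : dx = 0
      · have hdy : dy ≠ 0 := fun hy => hpre ⟨hdx, hy⟩; exact absurd h hdy
      · have : Int.gcd dx dy = dx.natAbs := by rw [h]; simp [Int.gcd]
        rw [this]; simp only [h, Int.abs_eq_natAbs]
        simp [hdx]
  · rw [if_neg hz]
    push_neg at hz
    obtain ⟨hdx, hdy⟩ := hz
    set step : Int := if |dx| < |dy| then |dx| else |dy| with hstep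
    have hsg : (Int.gcd dx dy : Int) ≤ step := by
      have h1 : (Int.gcd dx dy : Int) ≤ |dx| :=
        Int.le_of_dvd (abs_pos.mpr hdx) ((dvd_abs _ _).mpr (Int.gcd_dvd_left dx dy))
      have h2 : (Int.gcd dx dy : Int) ≤ |dy| :=
        Int.le_of_dvd (abs_pos.mpr hdy) ((dvd_abs _ _).mpr (Int.gcd_dvd_right dx dy))
      rw [hstep]; split <;> assumption
    have hstepnat : step = ((step.toNat : Nat) : Int) := by
      have : 0 < step := by
        rw [hstep]; split <;> [exact abs_pos.mpr hdx; exact abs_pos.mpr hdy]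
      omega
    rw [hstepnat]
    exact loop_finds_gcd dx dy hdx hdy step.toNat (by omega)

-- ===== VERDICT (by name: the statement is the Claim_ definition above) =====
theorem commen_divider_spec : Claim_equal_commen_divider := by
  intro dx dy _ hpre
  unfold Spec_commen_divider
  exact commen_divider_eq dx dy hpre
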